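-- pv_equiv track=rewrite | github.com/BobLinChiBo/OCR_Preprocess_ToTable | visualization/run_visualizations.py | parse_script_args
-- ===== SOURCE A (Python) =====
-- from typing import Dict, List, Optional, Any
--
-- def parse_script_args(script_args: List[str]) -> Dict[str, List[str]]:
--     """Parse per-script arguments from command line."""
--     result = {}
--     current_script = None
--
--     for arg in script_args:
--         if arg.startswith('--') and arg.endswith('-args'):
--             # Extract script name (e.g., --deskew-args -> deskew)
--             current_script = arg[2:-5]  # Remove -- and -args
--             result[current_script] = []
--         elif current_script:
--             result[current_script].append(arg)
--         else:
--             # Global argument - ignore for now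
--             pass
--
--     return result
-- ===== SOURCE B (Python) =====
-- def parse_script_args(script_args):
--     """Parse per-script arguments from command line."""
--     idxs = [i for i, a in enumerate(script_args)
--             if a.startswith('--') and a.endswith('-args')]
--     result = {}
--     for pos, nxt in zip(idxs, idxs[1:] + [len(script_args)]):
--         result[script_args[pos][2:-5]] = script_args[pos + 1:nxt]
--     return result
-- ===== Notes on version B (the rewrite author's own statement) =====
-- stated objective: alternative
-- what changed: Replaces A's single stateful scan (a current-script register with incremental dict mutation) by a two-phase decomposition: first collect all header-token positions, then slice the argument span between consecutive headers and assign it per script.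
-- intended difference: On inputs whose last degenerate header token '--args' or '---args' (whose extracted script name is the empty, hence falsy, string) is followed by a non-header argument, A silently drops the arguments following it and maps the empty-named script to an empty argument list, while B returns those arguments as that script's argument list, which is the intended reading of 'arguments after a header belong to that script'. — e.g. on parse_script_args(["--args", "x"]): A returns [("", [])], B returns [("", ["x"])]
import Mathlib
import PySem

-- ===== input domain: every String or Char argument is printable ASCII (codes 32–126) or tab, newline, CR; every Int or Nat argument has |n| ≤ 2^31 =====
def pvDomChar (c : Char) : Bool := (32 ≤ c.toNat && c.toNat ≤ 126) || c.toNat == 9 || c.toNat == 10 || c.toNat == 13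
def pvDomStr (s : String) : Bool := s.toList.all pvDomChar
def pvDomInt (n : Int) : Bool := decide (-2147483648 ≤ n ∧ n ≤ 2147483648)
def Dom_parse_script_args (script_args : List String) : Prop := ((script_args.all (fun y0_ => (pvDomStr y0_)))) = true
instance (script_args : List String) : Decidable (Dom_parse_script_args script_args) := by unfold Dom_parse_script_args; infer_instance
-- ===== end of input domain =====

-- B replaces A's single stateful scan (current-script register + dict mutation) by a
-- header-index pass followed by slicing each script's argument span (objective: alternative).

-- shared spec-level notion: a token '--<name>-args' that opens a script's argument list
def pvIsHeader (s : String) : Bool := PySem.Str.startswith s "--" && PySem.Str.endswith s "-args"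
def pvName (s : String) : String := PySem.Str.slice s (some 2) (some (-5))

-- ===== PORT A =====
def parse_script_args (script_args : List String) : List (String × List String) :=
  (script_args.foldl
    (fun (st : PySem.Dict String (List String) × Option String) arg =>
      if pvIsHeader arg then
        let name := pvName arg
        (st.1.insert name [], some name)
      else
        match st.2 with
        | some cur => if cur ≠ "" then (st.1.modify cur [] (fun l => l ++ [arg]), some cur) else st
        | none => st)
    (PySem.Dict.empty, none)).1.items

-- ===== PORT B =====
def parse_script_args_alt (script_args : List String) : List (String × List String) :=
  let idxs := ((PySem.List.enumerate script_args 0).filter (fun p => pvIsHeader p.2)).map (fun p => p.1)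
  let nexts := PySem.List.slice idxs (some 1) none ++ [PySem.List.len script_args]
  ((idxs.zip nexts).foldl
    (fun (d : PySem.Dict String (List String)) pb =>
      d.insert (pvName (PySem.List.pyGetD script_args pb.1 ""))
        (PySem.List.slice script_args (some (pb.1 + 1)) (some pb.2)))
    PySem.Dict.empty).items

-- ===== PRECONDITION & SPEC =====
-- a degenerate header token whose extracted script name is the empty string
def pvEmptok (a : String) : Bool := a == "--args" || a == "---args"
-- On inputs whose LAST degenerate header token '--args'/'---args' (script name empty, hence
-- falsy) is followed by a non-header argument, A silently drops the arguments following it and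
-- maps the empty-named script to an empty argument list, while B returns those arguments as
-- that script's argument list, the intended reading of 'arguments after a header'.
def D_parse_script_args (script_args : List String) : Prop :=
  ∃ i : Fin script_args.length, ↑i + 1 < script_args.length ∧
    pvEmptok script_args[i] = true ∧
    pvIsHeader (script_args.getD (↑i + 1) "") = false ∧
    ∀ j : Fin script_args.length, ↑i < ↑j → pvEmptok script_args[j] = false
instance (script_args : List String) : Decidable (D_parse_script_args script_args) := by
  unfold D_parse_script_args; infer_instance
def Spec_parse_script_args (script_args : List String) (out : List (String × List String)) : Prop :=
  ¬ D_parse_script_args script_args → out = parse_script_args_alt script_args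
instance (script_args : List String) (out : List (String × List String)) : Decidable (Spec_parse_script_args script_args out) := by unfold Spec_parse_script_args; infer_instance

def pvDiffWitness_parse_script_args : List String := ["--args", "x"]
def pvDiffWitnessOut_parse_script_args : (List (String × List String)) × (List (String × List String)) :=
  ([("", [])], [("", ["x"])])

-- ===== CLAIM (what is proved, stated in full; the proofs are below) =====
def Claim_unchanged_parse_script_args : Prop := ∀ (script_args : List String), Dom_parse_script_args script_args → Spec_parse_script_args script_args (parse_script_args script_args)
def Claim_changed_parse_script_args : Prop := Dom_parse_script_args (pvDiffWitness_parse_script_args) ∧ D_parse_script_args (pvDiffWitness_parse_script_args) ∧ parse_script_args (pvDiffWitness_parse_script_args) = pvDiffWitnessOut_parse_script_args.1 ∧ parse_script_args_alt (pvDiffWitness_parse_script_args) = pvDiffWitnessOut_parse_script_args.2 ∧ pvDiffWitnessOut_parse_script_args.1 ≠ pvDiffWitnessOut_parse_script_args.2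
def Claim_exact_parse_script_args : Prop := ∀ (script_args : List String), Dom_parse_script_args script_args → D_parse_script_args script_args → parse_script_args script_args ≠ parse_script_args_alt script_args

-- ===== LEMMAS AND PROOFS =====

-- the common segment decomposition: (script name, following non-header arguments) per header
def segs : List String → List (String × List String)
  | [] => []
  | x :: xs =>
    if pvIsHeader x then
      (pvName x, xs.takeWhile (fun a => !pvIsHeader a)) :: segs (xs.dropWhile (fun a => !pvIsHeader a))
    else segs xs
termination_by l => l.length
decreasing_by
  · have := List.length_dropWhile_le (fun a => !pvIsHeader a) xs; simp; omega
  · simp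

-- A's loop body as a named function (definitionally the lambda in the port)
def stepA (st : PySem.Dict String (List String) × Option String) (arg : String) :
    PySem.Dict String (List String) × Option String :=
  if pvIsHeader arg then
    let name := pvName arg
    (st.1.insert name [], some name)
  else
    match st.2 with
    | some cur => if cur ≠ "" then (st.1.modify cur [] (fun l => l ++ [arg]), some cur) else st
    | none => st

-- the fold each side reduces to, over the segment decomposition
def gA (d : PySem.Dict String (List String)) (p : String × List String) : PySem.Dict String (List String) :=
  d.insert p.1 (if p.1 = "" then [] else p.2)
def gB (d : PySem.Dict String (List String)) (p : String × List String) : PySem.Dict String (List String) :=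
  d.insert p.1 p.2

lemma modify_insert_self (d : PySem.Dict String (List String)) (n : String) (l : List String)
    (f : List String → List String) : (d.insert n l).modify n [] f = d.insert n (f l) := by
  simp [PySem.Dict.modify, PySem.Dict.getD_insert_self, PySem.Dict.insert_insert_self]

-- running A's loop over a header-free segment from state (d.insert n l, some n)
lemma segRunA (seg : List String) (h : ∀ a ∈ seg, pvIsHeader a = false)
    (d : PySem.Dict String (List String)) (n : String) (l : List String) :
    seg.foldl stepA (d.insert n l, some n) = (d.insert n (if n = "" then l else l ++ seg), some n) := by
  induction seg generalizing l with
  | nil => simp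
  | cons a seg ih =>
    have ha : pvIsHeader a = false := h a (by simp)
    by_cases hn : n = ""
    · subst hn
      simp only [List.foldl_cons, stepA, ha, Bool.false_eq_true, if_false, ne_eq,
        not_true_eq_false, if_false]
      simpa using ih (fun b hb => h b (by simp [hb])) l
    · simp only [List.foldl_cons, stepA, ha, Bool.false_eq_true, if_false, ne_eq, hn,
        not_false_eq_true, if_true, modify_insert_self]
      rw [ih (fun b hb => h b (by simp [hb])) (l ++ [a])]
      simp [hn, List.append_assoc]

lemma mainA (xs : List String) (d : PySem.Dict String (List String)) (c : Option String)
    (hx : xs.takeWhile (fun a => !pvIsHeader a) = [] ∨ c = none) :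
    (xs.foldl stepA (d, c)).1 = (segs xs).foldl gA d := by
  match xs with
  | [] => simp [segs]
  | x :: xs =>
    by_cases hhd : pvIsHeader x = true
    · have hstep : stepA (d, c) x = (d.insert (pvName x) [], some (pvName x)) := by
        simp [stepA, hhd]
      set seg := xs.takeWhile (fun a => !pvIsHeader a) with hseg
      set rest := xs.dropWhile (fun a => !pvIsHeader a) with hrest
      have hsplit : xs = seg ++ rest := (List.takeWhile_append_dropWhile ..).symm
      have hsegfree : ∀ a ∈ seg, pvIsHeader a = false := by
        intro a ha
        have := List.mem_takeWhile_imp (hseg ▸ ha)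
        simpa using this
      have hrest' : rest.takeWhile (fun a => !pvIsHeader a) = [] := by
        cases hr : rest with
        | nil => simp
        | cons y ys =>
          have hy : (fun a => !pvIsHeader a) y = false := by
            have := List.head?_dropWhile_not (fun a => !pvIsHeader a) xs
            rw [← hrest, hr] at this; simpa using this
          simp [hy]
      calc ((x :: xs).foldl stepA (d, c)).1
          = (rest.foldl stepA (seg.foldl stepA (d.insert (pvName x) [], some (pvName x)))).1 := by
            rw [List.foldl_cons, hstep, hsplit, List.foldl_append]
        _ = (rest.foldl stepA (d.insert (pvName x) (if pvName x = "" then [] else seg), some (pvName x))).1 := by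
            rw [segRunA seg hsegfree d (pvName x) []]; simp
        _ = (segs rest).foldl gA (d.insert (pvName x) (if pvName x = "" then [] else seg)) := by
            exact mainA rest _ _ (Or.inl hrest')
        _ = (segs (x :: xs)).foldl gA d := by
            rw [segs]; simp [hhd, gA, ← hseg, ← hrest]
    · have hhd' : pvIsHeader x = false := by simpa using hhd
      have hc : c = none := by
        rcases hx with hx | hx
        · rw [List.takeWhile_cons, hhd'] at hx; simp at hx
        · exact hx
      subst hc
      have hstep : stepA (d, none) x = (d, none) := by simp [stepA, hhd']
      rw [List.foldl_cons, hstep, segs]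
      simp only [hhd', Bool.false_eq_true, if_false]
      exact mainA xs d none (Or.inr rfl)
termination_by xs.length
decreasing_by
  · have := List.length_dropWhile_le (fun a => !pvIsHeader a) xs; simp; omega
  · simp

lemma A_eq_segs (sa : List String) :
    parse_script_args sa = ((segs sa).foldl gA PySem.Dict.empty).items := by
  unfold parse_script_args
  rw [show (fun (st : PySem.Dict String (List String) × Option String) arg =>
      if pvIsHeader arg then
        let name := pvName arg
        (st.1.insert name [], some name)
      else
        match st.2 with
        | some cur => if cur ≠ "" then (st.1.modify cur [] (fun l => l ++ [arg]), some cur) else st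
        | none => st) = stepA from rfl]
  rw [mainA sa PySem.Dict.empty none (Or.inr rfl)]

-- ----- B side -----

def idxsFrom (sa : List String) (s : Int) : List Int :=
  ((PySem.List.enumerate sa s).filter (fun p => pvIsHeader p.2)).map (fun p => p.1)

lemma idxsFrom_nil (s : Int) : idxsFrom [] s = [] := rfl

lemma idxsFrom_cons (x : String) (xs : List String) (s : Int) :
    idxsFrom (x :: xs) s =
      if pvIsHeader x then s :: idxsFrom xs (s + 1) else idxsFrom xs (s + 1) := by
  simp only [idxsFrom, PySem.List.enumerate_cons, List.filter_cons]
  by_cases h : pvIsHeader x <;> simp [h]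

lemma idxsFrom_append_free (seg rest : List String) (s : Int)
    (h : ∀ a ∈ seg, pvIsHeader a = false) :
    idxsFrom (seg ++ rest) s = idxsFrom rest (s + seg.length) := by
  induction seg generalizing s with
  | nil => simp
  | cons a seg ih =>
    rw [List.cons_append, idxsFrom_cons, if_neg (by simp [h a (by simp)])]
    rw [ih (s + 1) (fun b hb => h b (List.mem_cons_of_mem a hb))]
    congr 1; push_cast [List.length_cons]; omega

def pairsOf (orig : List String) (idxs : List Int) (stop : Int) : List (String × List String) :=
  (idxs.zip (idxs.drop 1 ++ [stop])).map
    (fun pb => (pvName (PySem.List.pyGetD orig pb.1 ""),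
                PySem.List.slice orig (some (pb.1 + 1)) (some pb.2)))

lemma mainB (sa pre : List String) :
    pairsOf (pre ++ sa) (idxsFrom sa (pre.length : Int)) ((pre.length + sa.length : Nat) : Int)
      = segs sa := by
  match sa with
  | [] => simp [idxsFrom_nil, pairsOf, segs]
  | x :: xs =>
    by_cases hhd : pvIsHeader x = true
    · set seg := xs.takeWhile (fun a => !pvIsHeader a) with hseg
      set rest := xs.dropWhile (fun a => !pvIsHeader a) with hrest
      have hsplit : xs = seg ++ rest := (List.takeWhile_append_dropWhile ..).symm
      have hsegfree : ∀ a ∈ seg, pvIsHeader a = false := by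
        intro a ha
        have := List.mem_takeWhile_imp (hseg ▸ ha)
        simpa using this
      have hidx : idxsFrom (x :: xs) (pre.length : Int)
          = (pre.length : Int) :: idxsFrom rest ((pre.length + 1 + seg.length : Nat) : Int) := by
        rw [idxsFrom_cons, if_pos hhd, hsplit, idxsFrom_append_free seg rest _ hsegfree]
        congr 2
      have horig : pre ++ x :: xs = (pre ++ x :: seg) ++ rest := by
        rw [hsplit]; simp
      have hplen : (pre ++ x :: seg).length = pre.length + 1 + seg.length := by
        simp; omega
      have hgetx : PySem.List.pyGetD (pre ++ x :: xs) (pre.length : Int) "" = x := by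
        rw [PySem.List.pyGetD_natCast]
        have : (pre ++ x :: xs).getD pre.length ""
            = ((pre ++ x :: xs)[pre.length]?).getD "" := by simp [List.getD]
        rw [this, List.getElem?_append_right (Nat.le_refl _)]
        simp
      have hslice : ∀ stop2 : Int, stop2 = ((pre.length + 1 + seg.length : Nat) : Int) →
          PySem.List.slice (pre ++ x :: xs) (some ((pre.length : Int) + 1)) (some stop2) = seg := by
        intro stop2 hstop; subst hstop
        have h1 : ((pre.length : Int) + 1) = ((pre.length + 1 : Nat) : Int) := by push_cast; ring
        have h2 : ((pre.length + 1 + seg.length : Nat) : Int)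
            = ((pre.length + 1 : Nat) : Int) + (seg.length : Int) := by push_cast; ring
        rw [h1, h2, PySem.List.slice_natCast_add]
        have hdrop : (pre ++ x :: xs).drop (pre.length + 1) = xs := by
          rw [show pre.length + 1 = pre.length + 1 from rfl, ← List.drop_drop,
            List.drop_left, List.drop_one, List.tail_cons]
        rw [hdrop, hsplit, List.take_left' rfl]
      cases hr : rest with
      | nil =>
        have hxs : xs = seg := by rw [hsplit, hr, List.append_nil]
        rw [hidx, hr, idxsFrom_nil]
        simp only [pairsOf, List.drop_one, List.tail_cons, List.nil_append, List.zip_cons_cons,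
          List.zip_nil_left, List.map_cons, List.map_nil]
        rw [segs]
        simp only [hhd, if_true, ← hseg, ← hrest, hr]
        rw [segs]
        refine congrArg (· :: []) ?_
        refine Prod.ext ?_ ?_
        · simp [hgetx]
        · show PySem.List.slice (pre ++ x :: xs) (some ((pre.length : Int) + 1))
              (some ((pre.length + (x :: xs).length : Nat) : Int)) = seg
          rw [hslice _ (by simp [hxs]; ring)]
      | cons y ys =>
        have hy : pvIsHeader y = true := by
          have := List.head?_dropWhile_not (fun a => !pvIsHeader a) xs
          rw [← hrest, hr] at this; simpa using this
        have hidx2 : idxsFrom rest ((pre.length + 1 + seg.length : Nat) : Int)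
            = ((pre.length + 1 + seg.length : Nat) : Int)
              :: idxsFrom ys (((pre.length + 1 + seg.length : Nat) : Int) + 1) := by
          rw [hr, idxsFrom_cons, if_pos hy]
        rw [hidx, hidx2]
        show pairsOf (pre ++ x :: xs) (_ :: _ :: _) _ = _
        rw [pairsOf]
        simp only [List.drop_one, List.tail_cons, List.cons_append, List.zip_cons_cons,
          List.map_cons]
        rw [segs]
        simp only [hhd, if_true, ← hseg, ← hrest]
        refine congrArg₂ (· :: ·) ?_ ?_
        · refine Prod.ext ?_ ?_
          · simp [hgetx]
          · show PySem.List.slice (pre ++ x :: xs) (some ((pre.length : Int) + 1))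
                (some ((pre.length + 1 + seg.length : Nat) : Int)) = seg
            exact hslice _ rfl
        · rw [hr]
          have hN : (pre.length + (x :: xs).length : Nat)
              = (pre.length + 1 + seg.length + (y :: ys).length : Nat) := by
            have hx2 : xs.length = seg.length + rest.length := by
              rw [hsplit]; simp
            rw [hr] at hx2; simp at hx2 ⊢; omega
          rw [hN]
          have hmb := mainB (y :: ys) (pre ++ x :: seg)
          rw [show (pre ++ x :: seg) ++ (y :: ys) = pre ++ x :: xs from by
            rw [hsplit, hr]; simp] at hmb
          rw [hplen] at hmb
          rw [← hmb, pairsOf, idxsFrom_cons, if_pos hy]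
          simp
    · have hhd' : pvIsHeader x = false := by simpa using hhd
      have hidx : idxsFrom (x :: xs) (pre.length : Int)
          = idxsFrom xs ((pre ++ [x]).length : Int) := by
        rw [idxsFrom_cons, if_neg (by simp [hhd'])]
        congr 1; simp
      have horig : pre ++ x :: xs = (pre ++ [x]) ++ xs := by simp
      have hlen : (pre.length + (x :: xs).length : Nat) = ((pre ++ [x]).length + xs.length : Nat) := by
        simp; omega
      rw [hidx, horig, hlen, mainB xs (pre ++ [x])]
      rw [segs]; simp [hhd']
termination_by sa.length
decreasing_by
  · have h1 := List.length_dropWhile_le (fun a => !pvIsHeader a) xs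
    rw [← hrest, hr] at h1; simp at h1 ⊢; omega
  · simp

lemma B_eq_segs (sa : List String) :
    parse_script_args_alt sa = ((segs sa).foldl gB PySem.Dict.empty).items := by
  unfold parse_script_args_alt
  have hsl : PySem.List.slice (idxsFrom sa 0) (some 1) none = (idxsFrom sa 0).drop 1 := by
    rw [PySem.List.slice_from_one, List.drop_one]
  show (((idxsFrom sa 0).zip (PySem.List.slice (idxsFrom sa 0) (some 1) none
      ++ [PySem.List.len sa])).foldl _ PySem.Dict.empty).items = _
  rw [hsl, PySem.List.len_eq]
  have hmain := mainB sa []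
  simp only [List.nil_append, List.length_nil, Nat.zero_add, Nat.cast_zero] at hmain
  have hfold : (((idxsFrom sa 0).zip ((idxsFrom sa 0).drop 1 ++ [(sa.length : Int)])).foldl
      (fun (d : PySem.Dict String (List String)) pb =>
        d.insert (pvName (PySem.List.pyGetD sa pb.1 ""))
          (PySem.List.slice sa (some (pb.1 + 1)) (some pb.2)))
      PySem.Dict.empty)
      = (pairsOf sa (idxsFrom sa 0) (sa.length : Int)).foldl gB PySem.Dict.empty := by
    rw [pairsOf, List.foldl_map]; rfl
  rw [hfold, hmain]

-- the string fact: a header token with empty script name is '--args' or '---args'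
lemma empty_header (t : String) (ht : pvIsHeader t = true) (hn : pvName t = "") :
    t = "--args" ∨ t = "---args" := by
  unfold pvIsHeader at ht
  obtain ⟨h1, h2⟩ := (Bool.and_eq_true _ _).mp ht
  have hpre : ['-','-'] <+: t.toList := by
    have := (PySem.Chars.startswith_iff t.toList "--".toList).mp (by simpa using h1)
    simpa using this
  have hsuf : ['-','a','r','g','s'] <:+ t.toList := by
    have := (PySem.Chars.endswith_iff t.toList "-args".toList).mp (by simpa using h2)
    simpa using this
  have hlist : PySem.List.slice t.toList (some 2) (some (-5)) = [] := by
    have := congrArg String.toList hn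
    simpa [pvName] using this
  have hlen7 : t.toList.length ≤ 7 := by
    have hl := congrArg List.length hlist
    rw [PySem.List.length_slice] at hl
    rw [PySem.List.clampIdx_neg_ofNat _ 5 (by omega)] at hl
    have h2' : PySem.List.clampIdx t.toList.length 2 = min 2 t.toList.length := by
      simp
    rw [h2'] at hl
    have hge : 2 ≤ t.toList.length := hpre.length_le
    rw [Nat.min_eq_left hge] at hl
    simp only [List.length_nil] at hl
    omega
  obtain ⟨u, hu⟩ := hsuf
  obtain ⟨r, hr⟩ := hpre
  have key : ['-','-'] ++ r = u ++ ['-','a','r','g','s'] := hr.trans hu.symm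
  have hul : u.length ≤ 2 := by
    have := congrArg List.length hu; simp at this
    have h7 : t.length ≤ 7 := by simpa using hlen7
    omega
  match u, hul, hu, key with
  | [], _, hu, key => simp at key
  | [c], _, hu, key =>
    simp at key
    obtain ⟨hc, -⟩ := key
    subst hc
    left
    apply String.toList_inj.mp
    rw [← hu]; rfl
  | [c1, c2], _, hu, key =>
    simp at key
    obtain ⟨hc1, hc2, -⟩ := key
    subst hc1; subst hc2
    right
    apply String.toList_inj.mp
    rw [← hu]; rfl

-- ----- linking pvEmptok to header tokens with empty name -----
lemma emptok_of_empty_name (t : String) (ht : pvIsHeader t = true) (hn : pvName t = "") :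
    pvEmptok t = true := by
  rcases empty_header t ht hn with h | h <;> simp [pvEmptok, h]

lemma emptok_elim (t : String) (he : pvEmptok t = true) :
    pvIsHeader t = true ∧ pvName t = "" := by
  have h2 : t = "--args" ∨ t = "---args" := by simpa [pvEmptok] using he
  rcases h2 with h | h <;> subst h <;> exact ⟨by decide, by decide⟩

-- the argument list of the LAST degenerate header token, scanned recursively
def lastE : List String → Option (List String)
  | [] => none
  | x :: xs =>
    match lastE xs with
    | some l => some l
    | none => if pvEmptok x then some (xs.takeWhile (fun a => !pvIsHeader a)) else none

lemma lastE_eq_none_iff (sa : List String) :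
    lastE sa = none ↔ ∀ a ∈ sa, pvEmptok a = false := by
  induction sa with
  | nil => simp [lastE]
  | cons x xs ih =>
    cases h : lastE xs with
    | some l =>
      simp only [lastE, h]
      constructor
      · intro hc; exact absurd hc (by simp)
      · intro hall
        exact absurd ((ih.mpr (fun a ha => hall a (by simp [ha]))).symm.trans h) (by simp)
    | none =>
      simp only [lastE, h]
      by_cases he : pvEmptok x = true
      · simp only [he, if_true]
        constructor
        · intro hc; exact absurd hc (by simp)
        · intro hall; exact absurd (hall x (by simp)) (by simp [he])
      · have he' : pvEmptok x = false := by simpa using he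
        simp only [he', Bool.false_eq_true, if_false, true_iff]
        intro a ha
        rcases List.mem_cons.mp ha with rfl | ha
        · exact he'
        · exact (ih.mp h) a ha

lemma lastE_append_free (seg rest : List String) (h : ∀ a ∈ seg, pvIsHeader a = false) :
    lastE (seg ++ rest) = lastE rest := by
  induction seg with
  | nil => simp
  | cons a seg ih =>
    have hha : pvIsHeader a = false := h a (by simp)
    have hea : pvEmptok a = false := by
      cases he : pvEmptok a with
      | false => rfl
      | true => exact absurd (emptok_elim a he).1 (by simp [hha])
    rw [List.cons_append, lastE, ih (fun b hb => h b (by simp [hb]))]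
    cases hr : lastE rest <;> simp [hea]

lemma lastE_eq_segsF (sa : List String) :
    ((segs sa).filter (fun p => p.1 == "")).getLast? = (lastE sa).map (fun l => ("", l)) := by
  match sa with
  | [] => simp [segs, lastE]
  | x :: xs =>
    by_cases hhd : pvIsHeader x = true
    · set seg := xs.takeWhile (fun a => !pvIsHeader a) with hseg
      set rest := xs.dropWhile (fun a => !pvIsHeader a) with hrest
      have hsplit : xs = seg ++ rest := (List.takeWhile_append_dropWhile ..).symm
      have hsegfree : ∀ a ∈ seg, pvIsHeader a = false := by
        intro a ha
        have := List.mem_takeWhile_imp (hseg ▸ ha)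
        simpa using this
      have hLE : lastE (x :: xs) =
          match lastE rest with
          | some l => some l
          | none => if pvEmptok x then some seg else none := by
        rw [lastE, show lastE xs = lastE rest from by
          rw [hsplit]; exact lastE_append_free seg rest hsegfree, ← hseg]
      have hname : (pvName x == "") = pvEmptok x := by
        cases he : pvEmptok x with
        | true => simp [(emptok_elim x he).2]
        | false =>
          cases hn : (pvName x == "") with
          | false => rfl
          | true => exact absurd (emptok_of_empty_name x hhd (by simpa using hn)) (by simp [he])
      have hIH := lastE_eq_segsF rest
      rw [segs, if_pos hhd, ← hseg, ← hrest, List.filter_cons, hLE]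
      simp only [hname]
      cases he : pvEmptok x with
      | true =>
        rw [if_pos (by rfl), show ((pvName x, seg) :: List.filter (fun p => p.1 == "") (segs rest))
            = [(pvName x, seg)] ++ List.filter (fun p => p.1 == "") (segs rest) from rfl,
          List.getLast?_append, hIH]
        cases hr : lastE rest with
        | some l => rfl
        | none => simp [(emptok_elim x he).2]
      | false =>
        rw [if_neg (by simp), hIH]
        cases hr : lastE rest with
        | some l => rfl
        | none => rfl
    · have hhd' : pvIsHeader x = false := by simpa using hhd
      have hea : pvEmptok x = false := by
        cases he : pvEmptok x with
        | false => rfl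
        | true => exact absurd (emptok_elim x he).1 (by simp [hhd'])
      rw [segs, if_neg (by simp [hhd']), lastE]
      cases hx : lastE xs with
      | some l => rw [lastE_eq_segsF xs, hx]
      | none => rw [lastE_eq_segsF xs, hx]; simp [hea]
termination_by sa.length
decreasing_by
  all_goals first
    | (simp only [List.length_cons]
       exact Nat.lt_succ_of_le (List.length_dropWhile_le (fun a => !pvIsHeader a) xs))
    | simp

-- ----- lookups through the two insert folds -----
lemma getfold_ne (l : List (String × List String)) (k : String) (hk : k ≠ "")
    (d1 d2 : PySem.Dict String (List String)) (h : d1.get? k = d2.get? k) :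
    (l.foldl gA d1).get? k = (l.foldl gB d2).get? k := by
  induction l generalizing d1 d2 with
  | nil => exact h
  | cons p l ih =>
    rw [List.foldl_cons, List.foldl_cons]
    apply ih
    rw [gA, gB, PySem.Dict.get?_insert, PySem.Dict.get?_insert]
    by_cases hpk : k = p.1
    · rw [if_pos hpk, if_pos hpk, if_neg (by rw [← hpk]; exact hk)]
    · rw [if_neg hpk, if_neg hpk, h]

lemma getfoldA_empty (l : List (String × List String)) (d : PySem.Dict String (List String)) :
    (l.foldl gA d).get? "" = if l.any (fun p => p.1 == "") then some [] else d.get? "" := by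
  induction l using List.reverseRecOn with
  | nil => simp
  | append_singleton l p ih =>
    rw [List.foldl_append, List.foldl_cons, List.foldl_nil, gA, PySem.Dict.get?_insert]
    by_cases hp : p.1 = ""
    · rw [if_pos hp.symm, if_pos hp, if_pos (by simp [hp])]
    · rw [if_neg (fun hc => hp hc.symm), ih]
      have : (l ++ [p]).any (fun p => p.1 == "") = l.any (fun p => p.1 == "") := by
        simp [hp]
      rw [this]

lemma getfoldB_empty (l : List (String × List String)) (d : PySem.Dict String (List String)) :
    (l.foldl gB d).get? "" =
      match (l.filter (fun p => p.1 == "")).getLast? with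
      | some p => some p.2
      | none => d.get? "" := by
  induction l using List.reverseRecOn with
  | nil => simp
  | append_singleton l p ih =>
    rw [List.foldl_append, List.foldl_cons, List.foldl_nil, gB, PySem.Dict.get?_insert,
      List.filter_append]
    by_cases hp : p.1 = ""
    · rw [if_pos hp.symm]
      have h1 : List.filter (fun p => p.1 == "") [p] = [p] := by simp [hp]
      rw [h1, List.getLast?_append, show ([p].getLast?).or
        ((List.filter (fun p => p.1 == "") l).getLast?) = some p from rfl]
    · rw [if_neg (fun hc => hp hc.symm), ih]
      have : List.filter (fun p => p.1 == "") [p] = [] := by simp [hp]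
      rw [this, List.append_nil]

-- ----- keys of the two insert folds -----
lemma keysfoldA (l : List (String × List String)) :
    (l.foldl gA PySem.Dict.empty).keys = PySem.Set.ofList (l.map Prod.fst) := by
  have := PySem.Dict.keys_foldl_insert_key l (fun p : String × List String => p.1)
    (fun _ p => if p.1 = "" then [] else p.2) PySem.Dict.empty
  simpa [gA, PySem.Dict.keys_empty, PySem.Set.update_empty] using this

lemma keysfoldB (l : List (String × List String)) :
    (l.foldl gB PySem.Dict.empty).keys = PySem.Set.ofList (l.map Prod.fst) := by
  have := PySem.Dict.keys_foldl_insert_key l (fun p : String × List String => p.1)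
    (fun _ p => p.2) PySem.Dict.empty
  simpa [gB, PySem.Dict.keys_empty, PySem.Set.update_empty] using this

lemma nodupA (l : List (String × List String)) : (l.foldl gA PySem.Dict.empty).keys.Nodup := by
  have := PySem.Dict.nodup_keys_foldl_insert_key l (fun p : String × List String => p.1)
    (fun _ p => if p.1 = "" then [] else p.2) PySem.Dict.empty (by simp)
  simpa [gA] using this

lemma nodupB (l : List (String × List String)) : (l.foldl gB PySem.Dict.empty).keys.Nodup := by
  have := PySem.Dict.nodup_keys_foldl_insert_key l (fun p : String × List String => p.1)
    (fun _ p => p.2) PySem.Dict.empty (by simp)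
  simpa [gB] using this

-- items agree as soon as every lookup agrees
lemma items_eq_of_get?_eq (sa : List String)
    (h : ∀ k, ((segs sa).foldl gA PySem.Dict.empty).get? k
        = ((segs sa).foldl gB PySem.Dict.empty).get? k) :
    ((segs sa).foldl gA PySem.Dict.empty).items = ((segs sa).foldl gB PySem.Dict.empty).items := by
  rw [PySem.Dict.items_eq_map_keys _ (nodupA (segs sa)) ([] : List String),
    PySem.Dict.items_eq_map_keys _ (nodupB (segs sa)) ([] : List String),
    keysfoldA, keysfoldB]
  apply List.map_congr_left
  intro k _
  rw [PySem.Dict.getD_eq_get?_getD, PySem.Dict.getD_eq_get?_getD, h k]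

-- ----- D_ is exactly 'lastE yields a nonempty list' -----
lemma D_iff_lastE (sa : List String) :
    D_parse_script_args sa ↔ ∃ l, lastE sa = some l ∧ l ≠ [] := by
  induction sa with
  | nil =>
    constructor
    · rintro ⟨⟨i, hi⟩, -⟩; exact absurd hi (by simp)
    · rintro ⟨l, hl, -⟩; simp [lastE] at hl
  | cons x xs ih =>
    cases hLE : lastE xs with
    | some l =>
      have hex : ¬ ∀ a ∈ xs, pvEmptok a = false := by
        intro hall
        exact absurd ((lastE_eq_none_iff xs).mpr hall) (by simp [hLE])
      have hLEx : lastE (x :: xs) = some l := by rw [lastE, hLE]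
      constructor
      · rintro ⟨⟨i, hi⟩, hsucc, hemp, hnhdr, hlast⟩
        simp only [Fin.getElem_fin] at hemp
        have hipos : 0 < i := by
          by_contra h0
          have hi0 : i = 0 := by omega
          subst hi0
          apply hex
          intro a ha
          obtain ⟨j, hj, rfl⟩ := List.mem_iff_getElem.mp ha
          have hres := hlast ⟨j + 1, by simp; omega⟩ (Fin.mk_lt_mk.mpr (by omega))
          simpa only [Fin.getElem_fin, List.getElem_cons_succ] using hres
        have hilt : i - 1 < xs.length := by simp at hi; omega
        have hDxs : D_parse_script_args xs := by
          refine ⟨⟨i - 1, hilt⟩, by simp at hsucc ⊢; omega, ?_, ?_, ?_⟩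
          · simp only [Fin.getElem_fin]
            have hh : (x :: xs)[i]'hi = xs[i - 1]'hilt := by
              rcases Nat.exists_eq_add_of_lt hipos with ⟨i', rfl⟩
              simp
            rw [← hh]; exact hemp
          · have hh : (x :: xs).getD (i + 1) "" = xs.getD (i - 1 + 1) "" := by
              rcases Nat.exists_eq_add_of_lt hipos with ⟨i', rfl⟩
              simp [List.getD]
            rw [← hh]; exact hnhdr
          · rintro ⟨j, hj⟩ hij
            simp only [Fin.lt_def] at hij
            have hres := hlast ⟨j + 1, by simp; omega⟩ (Fin.mk_lt_mk.mpr (by omega))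
            simpa only [Fin.getElem_fin, List.getElem_cons_succ] using hres
        obtain ⟨l', hl', hne⟩ := ih.mp hDxs
        rw [hLE] at hl'
        exact ⟨l, hLEx, by cases hl'; exact hne⟩
      · rintro ⟨l', hsome, hne⟩
        rw [hLEx] at hsome
        cases hsome
        obtain ⟨⟨i, hi⟩, hsucc, hemp, hnhdr, hlast⟩ := ih.mpr ⟨l, hLE, hne⟩
        simp only [Fin.getElem_fin] at hemp
        refine ⟨⟨i + 1, by simp; omega⟩, by simp at hsucc ⊢; omega, ?_, ?_, ?_⟩
        · simpa only [Fin.getElem_fin, List.getElem_cons_succ] using hemp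
        · have hh : (x :: xs).getD (i + 1 + 1) "" = xs.getD (i + 1) "" := by
            simp [List.getD]
          rw [hh]
          simpa only [Fin.val_mk] using hnhdr
        · rintro ⟨j, hj⟩ hij
          simp only [Fin.lt_def] at hij
          rcases Nat.exists_eq_add_of_lt (show 0 < j by omega) with ⟨j', rfl⟩
          have hres := hlast ⟨j', by simp at hj; omega⟩ (Fin.mk_lt_mk.mpr (by omega))
          simp only [Fin.getElem_fin] at hres
          simp only [Fin.getElem_fin, Nat.zero_add, List.getElem_cons_succ]
          exact hres
    | none =>
      have hall : ∀ a ∈ xs, pvEmptok a = false := (lastE_eq_none_iff xs).mp hLE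
      have hLEx : lastE (x :: xs) =
          if pvEmptok x then some (xs.takeWhile (fun a => !pvIsHeader a)) else none := by
        rw [lastE, hLE]
      constructor
      · rintro ⟨⟨i, hi⟩, hsucc, hemp, hnhdr, hlast⟩
        simp only [Fin.getElem_fin] at hemp
        simp only [] at hsucc hnhdr
        have hi0 : i = 0 := by
          by_contra h0
          rcases Nat.exists_eq_add_of_lt (show 0 < i by omega) with ⟨i', rfl⟩
          have hilt : i' < xs.length := by simp at hi; omega
          have hmem : xs[i']'hilt ∈ xs := List.getElem_mem _
          have hf := hall _ hmem
          have hh : pvEmptok (xs[i']'hilt) = true := by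
            simpa only [Nat.zero_add, List.getElem_cons_succ] using hemp
          rw [hh] at hf
          simp at hf
        subst hi0
        have hex : pvEmptok x = true := by simpa using hemp
        rcases hxs : xs with _ | ⟨y, ys⟩
        · rw [hxs] at hsucc; simp at hsucc
        · have hy : pvIsHeader y = false := by
            rw [hxs] at hnhdr
            simpa [List.getD] using hnhdr
          refine ⟨y :: ys.takeWhile (fun a => !pvIsHeader a), ?_, by simp⟩
          rw [← hxs, hLEx, if_pos hex, hxs]
          simp [hy]
      · rintro ⟨l, hsome, hne⟩
        rw [hLEx] at hsome
        by_cases hex : pvEmptok x = true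
        · rw [if_pos hex] at hsome
          cases hsome
          rcases hxs : xs with _ | ⟨y, ys⟩
          · subst hxs; simp at hne
          · subst hxs
            have hy : pvIsHeader y = false := by
              by_contra hyc
              have hyc' : pvIsHeader y = true := by simpa using hyc
              simp [hyc'] at hne
            refine ⟨⟨0, by simp⟩, by simp, by simpa using hex, ?_, ?_⟩
            · show pvIsHeader ((x :: y :: ys).getD (0 + 1) "") = false
              simpa [List.getD] using hy
            · rintro ⟨j, hj⟩ hij
              simp only [Fin.lt_def] at hij
              rcases Nat.exists_eq_add_of_lt (show 0 < j by omega) with ⟨j', rfl⟩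
              have hjlt : j' < (y :: ys).length := by
                simp only [Nat.zero_add, List.length_cons] at hj ⊢; omega
              have hf := hall ((y :: ys)[j']'hjlt) (List.getElem_mem hjlt)
              simp only [Fin.getElem_fin, Nat.zero_add, List.getElem_cons_succ]
              exact hf
        · rw [if_neg hex] at hsome
          simp at hsome

lemma any_of_getLast?_filter {l : List (String × List String)} {q : String × List String}
    (h : (l.filter (fun p => p.1 == "")).getLast? = some q) :
    l.any (fun p => p.1 == "") = true := by
  have hmem : q ∈ l.filter (fun p => p.1 == "") := List.mem_of_getLast? h
  obtain ⟨hql, hq⟩ := List.mem_filter.mp hmem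
  exact List.any_eq_true.mpr ⟨q, hql, hq⟩

-- ===== VERDICT (by name: the statement is the Claim_ definition above) =====
theorem parse_script_args_spec : Claim_unchanged_parse_script_args := by
  intro sa _ hD
  show parse_script_args sa = parse_script_args_alt sa
  rw [A_eq_segs, B_eq_segs]
  apply items_eq_of_get?_eq
  intro k
  by_cases hk : k = ""
  · subst hk
    rw [getfoldA_empty, getfoldB_empty]
    have hF := lastE_eq_segsF sa
    cases hle : lastE sa with
    | none =>
      rw [hle] at hF
      have hfilter : (segs sa).filter (fun p => p.1 == "") = [] := by
        simpa [List.getLast?_eq_none_iff] using hF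
      have hany : (segs sa).any (fun p => p.1 == "") = false := by
        rw [List.any_eq_false]
        intro p hp
        have := List.filter_eq_nil_iff.mp hfilter p hp
        simpa using this
      rw [hfilter, hany]
      rfl
    | some l =>
      have hl0 : l = [] := by
        by_contra hne
        exact hD ((D_iff_lastE sa).mpr ⟨l, hle, hne⟩)
      subst hl0
      rw [hle] at hF
      rw [hF, any_of_getLast?_filter hF]
      rfl
  · exact getfold_ne (segs sa) k hk _ _ rfl

theorem parse_script_args_changed : Claim_changed_parse_script_args := by
  unfold Claim_changed_parse_script_args; decide

theorem parse_script_args_tight : Claim_exact_parse_script_args := by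
  intro sa _ hD heq
  obtain ⟨l, hle, hne⟩ := (D_iff_lastE sa).mp hD
  rw [A_eq_segs, B_eq_segs] at heq
  have hdict : (segs sa).foldl gA PySem.Dict.empty = (segs sa).foldl gB PySem.Dict.empty :=
    PySem.Dict.ext heq
  have h0 := congrArg (fun d => PySem.Dict.get? d "") hdict
  simp only at h0
  rw [getfoldA_empty, getfoldB_empty] at h0
  have hF := lastE_eq_segsF sa
  rw [hle] at hF
  rw [hF, any_of_getLast?_filter hF] at h0
  simp at h0
  exact hne h0
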